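-- pv_equiv track=rewrite | github.com/dingtd/- | p2mpage.py | lleft1
-- ===== SOURCE A (Python) =====
-- def lleft1(l,i,j,sign):
--     s = []
--     count = 0
--     x = 3
--     if j == 0:
--         count = 0
--     else:
--         while 1:
--             if j >= 1:
--                 j -= 1
--                 if l[i][j] == sign:
--                     count += 1
--                 else:
--                     x = l[i][j]
--                     break
--             else:
--                 x = 3
--                 break
--     s = [count,x]
--     return s
-- ===== SOURCE B (Python) =====
-- def lleft1(l, i, j, sign):
--     # Forward scan: remember the index of the LAST cell in row[:j] that
--     # differs from sign; the run length and stopper fall out of it.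
--     if j <= 0:
--         return [0, 3]
--     row = l[i]
--     last = -1
--     for k in range(j):
--         if row[k] != sign:
--             last = k
--     if last == -1:
--         return [j, 3]
--     return [j - 1 - last, row[last]]
-- ===== Notes on version B (the rewrite author's own statement) =====
-- stated objective: alternative
-- what changed: Replaces A's backward while-loop that walks from j-1 toward 0 counting matches until the first mismatch with a forward left-to-right scan over row[:j] that tracks the index of the last mismatching cell; count and stopper are derived arithmetically from that index afterwards.
import Mathlib
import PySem

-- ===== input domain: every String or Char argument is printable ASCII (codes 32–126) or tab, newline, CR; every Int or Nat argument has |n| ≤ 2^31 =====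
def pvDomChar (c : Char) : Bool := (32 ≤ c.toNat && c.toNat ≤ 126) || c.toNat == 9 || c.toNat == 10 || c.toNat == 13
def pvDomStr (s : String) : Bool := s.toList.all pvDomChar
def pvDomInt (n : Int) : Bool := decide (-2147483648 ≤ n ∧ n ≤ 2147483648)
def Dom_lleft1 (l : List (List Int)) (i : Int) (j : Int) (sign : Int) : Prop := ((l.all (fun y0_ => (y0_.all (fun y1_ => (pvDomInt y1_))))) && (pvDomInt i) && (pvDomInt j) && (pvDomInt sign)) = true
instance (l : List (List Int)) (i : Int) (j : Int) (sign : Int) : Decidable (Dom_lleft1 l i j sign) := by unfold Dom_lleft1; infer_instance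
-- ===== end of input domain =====

-- B replaces A's backward while-loop with a forward scan that tracks the last mismatch index; return-value equivalence.

-- ===== PORT A =====
-- A's while-loop: j is decremented each iteration; fuel = the current value of j (clamped at 0).
def lleft1Loop (l : List (List Int)) (i : Int) (sign : Int) : Nat → Int × Int
  | 0 => (0, 3)
  | n + 1 =>
    if PySem.List.pyGetD ((PySem.List.pyGet? l i).getD []) (Int.ofNat n) 0 = sign then
      ((lleft1Loop l i sign n).1 + 1, (lleft1Loop l i sign n).2)
    else
      (0, PySem.List.pyGetD ((PySem.List.pyGet? l i).getD []) (Int.ofNat n) 0)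

def lleft1 (l : List (List Int)) (i : Int) (j : Int) (sign : Int) : List Int :=
  if j = 0 then [0, 3]
  else [(lleft1Loop l i sign j.toNat).1, (lleft1Loop l i sign j.toNat).2]

-- ===== PORT B =====
-- forward pass: index of the last cell of row[:j] that differs from sign (-1 if none)
def lleft1LastMismatch (row : List Int) (j : Int) (sign : Int) : Int :=
  (PySem.List.pyRange 0 j 1).foldl
    (fun last k => if PySem.List.pyGetD row k 0 ≠ sign then k else last) (-1)

def lleft1_alt (l : List (List Int)) (i : Int) (j : Int) (sign : Int) : List Int :=
  if j ≤ 0 then [0, 3]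
  else
    let row := (PySem.List.pyGet? l i).getD []
    let last := lleft1LastMismatch row j sign
    if last = -1 then [j, 3]
    else [j - 1 - last, PySem.List.pyGetD row last 0]

-- ===== PRECONDITION & SPEC =====
-- Pre_ excludes exactly the inputs where A raises IndexError: when the loop body runs (j ≥ 1),
-- l[i] must exist and the first access l[i][j-1] must be in range (then all later ones are).
def Pre_lleft1 (l : List (List Int)) (i : Int) (j : Int) (sign : Int) : Prop :=
  1 ≤ j → ((PySem.List.pyGet? l i).isSome ∧ j ≤ (((PySem.List.pyGet? l i).getD []).length : Int))
instance (l : List (List Int)) (i : Int) (j : Int) (sign : Int) : Decidable (Pre_lleft1 l i j sign) := by unfold Pre_lleft1; infer_instance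

def pvWitness_lleft1 : List (List Int) × Int × Int × Int := ([[1, 2, 2]], 0, 3, 2)

def Spec_lleft1 (l : List (List Int)) (i : Int) (j : Int) (sign : Int) (out : List Int) : Prop := out = lleft1_alt l i j sign
instance (l : List (List Int)) (i : Int) (j : Int) (sign : Int) (out : List Int) : Decidable (Spec_lleft1 l i j sign out) := by unfold Spec_lleft1; infer_instance

-- ===== CLAIM (what is proved, stated in full; the proofs are below) =====
def Claim_equal_lleft1 : Prop := ∀ (l : List (List Int)) (i : Int) (j : Int) (sign : Int), Dom_lleft1 l i j sign → Pre_lleft1 l i j sign → Spec_lleft1 l i j sign (lleft1 l i j sign)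

-- ===== LEMMAS AND PROOFS =====

-- Characterisation of A's loop: the first component is the run length of the reversed prefix,
-- the second is 3 at the edge or the cell just past the run.
theorem lleft1Loop_spec (l : List (List Int)) (i : Int) (sign : Int) (n : Nat)
    (hn : n ≤ ((PySem.List.pyGet? l i).getD []).length) :
    lleft1Loop l i sign n =
      (((((((PySem.List.pyGet? l i).getD []).take n).reverse.takeWhile (fun v => v == sign)).length : Nat) : Int),
        if ((((((PySem.List.pyGet? l i).getD []).take n).reverse.takeWhile (fun v => v == sign)).length : Int) = (n : Int)) then (3 : Int)
        else PySem.List.pyGetD ((PySem.List.pyGet? l i).getD []) ((n : Int) - 1 - ((((((PySem.List.pyGet? l i).getD []).take n).reverse.takeWhile (fun v => v == sign)).length : Int))) 0) := by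
  induction n with
  | zero => simp [lleft1Loop]
  | succ m ih =>
    have hm : m < ((PySem.List.pyGet? l i).getD []).length := by omega
    set row := (PySem.List.pyGet? l i).getD [] with hrow
    have htake : row.take (m + 1) = row.take m ++ [row[m]] := by
      rw [List.take_add_one]
      simp [List.getElem?_eq_getElem hm]
    have hv : PySem.List.pyGetD row (Int.ofNat m) 0 = row[m] := by
      simp [Int.ofNat_eq_natCast, PySem.List.pyGetD_natCast, List.getD, List.getElem?_eq_getElem hm]
    have htw_le : ((row.take m).reverse.takeWhile (fun v => v == sign)).length ≤ m := by
      calc ((row.take m).reverse.takeWhile (fun v => v == sign)).length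
          ≤ (row.take m).reverse.length := ((row.take m).reverse.takeWhile_sublist _).length_le
        _ = (row.take m).length := List.length_reverse
        _ ≤ m := by simp
    rw [lleft1Loop, hv, htake]
    simp only [List.reverse_append, List.reverse_cons, List.reverse_nil, List.nil_append,
      List.cons_append, List.takeWhile]
    by_cases hs : row[m] = sign
    · have hb : (row[m] == sign) = true := by simpa using hs
      rw [if_pos hs, ih (by omega), hb]
      simp only [List.length_cons, Prod.mk.injEq]
      refine ⟨by push_cast; ring, ?_⟩
      by_cases he : ((row.take m).reverse.takeWhile (fun v => v == sign)).length = m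
      · rw [if_pos (by push_cast; omega), if_pos (by omega)]
      · rw [if_neg (by push_cast; omega), if_neg (by omega)]
        congr 1
        push_cast; ring
    · have hb : (row[m] == sign) = false := by simpa using hs
      rw [if_neg hs, hb]
      simp only [List.length_nil, Nat.cast_zero, Prod.mk.injEq]
      refine ⟨trivial, ?_⟩
      rw [if_neg (by push_cast; omega)]
      rw [show ((m + 1 : Nat) : Int) - 1 - 0 = Int.ofNat m by rw [Int.ofNat_eq_natCast]; push_cast; ring, hv]

-- Characterisation of B's forward scan in the same terms: the last mismatch index is
-- -1 when the whole prefix matches, else n - 1 - (run length of the reversed prefix).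
theorem lleft1LastMismatch_spec (row : List Int) (sign : Int) (n : Nat)
    (hn : n ≤ row.length) :
    lleft1LastMismatch row (n : Int) sign =
      (if ((((row.take n).reverse.takeWhile (fun v => v == sign)).length : Int) = (n : Int)) then (-1 : Int)
       else (n : Int) - 1 - ((((row.take n).reverse.takeWhile (fun v => v == sign)).length : Int))) := by
  induction n with
  | zero => simp [lleft1LastMismatch, PySem.List.pyRange_zero]
  | succ m ih =>
    have hm : m < row.length := by omega
    have htake : row.take (m + 1) = row.take m ++ [row[m]] := by
      rw [List.take_add_one]
      simp [List.getElem?_eq_getElem hm]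
    have hv : PySem.List.pyGetD row ((m : Nat) : Int) 0 = row[m] := by
      simp [PySem.List.pyGetD_natCast, List.getD, List.getElem?_eq_getElem hm]
    have htw_le : ((row.take m).reverse.takeWhile (fun v => v == sign)).length ≤ m := by
      calc ((row.take m).reverse.takeWhile (fun v => v == sign)).length
          ≤ (row.take m).reverse.length := ((row.take m).reverse.takeWhile_sublist _).length_le
        _ = (row.take m).length := List.length_reverse
        _ ≤ m := by simp
    have hrange : PySem.List.pyRange 0 ((m : Int) + 1) 1 =
        PySem.List.pyRange 0 (m : Int) 1 ++ [(m : Int)] :=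
      PySem.List.pyRange_one_succ_right (by positivity)
    unfold lleft1LastMismatch at ih ⊢
    rw [show (((m + 1 : Nat) : Int)) = (m : Int) + 1 by push_cast; ring, hrange,
      List.foldl_append]
    simp only [List.foldl_cons, List.foldl_nil]
    rw [ih (by omega), htake]
    simp only [List.reverse_append, List.reverse_cons, List.reverse_nil, List.nil_append,
      List.cons_append, List.takeWhile]
    by_cases hs : row[m] = sign
    · have hb : (row[m] == sign) = true := by simpa using hs
      rw [hb]
      have hne : ¬ PySem.List.pyGetD row ((m : Nat) : Int) 0 ≠ sign := by rw [hv]; simpa using hs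
      simp only [List.length_cons, if_neg hne]
      by_cases he : ((row.take m).reverse.takeWhile (fun v => v == sign)).length = m
      · rw [if_pos (by push_cast; omega), if_pos (by push_cast; omega)]
      · rw [if_neg (by push_cast; omega), if_neg (by push_cast; omega)]
        push_cast; ring
    · have hb : (row[m] == sign) = false := by simpa using hs
      rw [hb]
      have hne : PySem.List.pyGetD row ((m : Nat) : Int) 0 ≠ sign := by rw [hv]; simpa using hs
      simp only [List.length_nil, if_pos hne]
      rw [if_neg (by push_cast; omega)]
      push_cast; ring

-- ===== VERDICT (by name: the statement is the Claim_ definition above) =====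
theorem lleft1_spec : Claim_equal_lleft1 := by
  intro l i j sign _ hpre
  unfold Spec_lleft1 lleft1 lleft1_alt
  by_cases hj : j ≤ 0
  · rw [if_pos hj]
    by_cases h0 : j = 0
    · rw [if_pos h0]
    · rw [if_neg h0]
      have h : j.toNat = 0 := by omega
      simp [h, lleft1Loop]
  · have hj1 : 1 ≤ j := by omega
    obtain ⟨_, hlen⟩ := hpre hj1
    rw [if_neg hj, if_neg (by omega : ¬ j = 0)]
    set row := (PySem.List.pyGet? l i).getD [] with hrow
    have hnle : j.toNat ≤ row.length := by omega
    have hcast : ((j.toNat : Nat) : Int) = j := by omega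
    have hB := lleft1LastMismatch_spec row sign j.toNat hnle
    rw [hcast] at hB
    rw [lleft1Loop_spec l i sign j.toNat hnle]
    simp only [← hrow, hcast, hB]
    set t : Int := ((((row.take j.toNat).reverse.takeWhile (fun v => v == sign)).length : Int)) with ht
    have htnn : 0 ≤ t := by positivity
    by_cases he : t = j
    · simp [he]
    · rw [if_neg he, if_neg he, if_neg (by omega : ¬ (j - 1 - t) = -1)]
      rw [show j - 1 - (j - 1 - t) = t from by ring]
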